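-- pv_equiv track=rewrite | github.com/tjweisman/geometry_tools | geometry_tools/automata/kbmag_utils.py | enumerate_fixed_length_paths
-- ===== SOURCE A (Python) =====
-- def follow_word(graph_dict, word, start_vertex):
--     vertex = start_vertex
--     for letter in word:
--         vertex = graph_dict[vertex][letter]
--
--     return vertex
--
-- def enumerate_fixed_length_paths(graph_dict, start_vertex, length):
--     if length <= 0:
--         yield ""
--     else:
--         for word in enumerate_fixed_length_paths(graph_dict, start_vertex, length - 1):
--             vertex = follow_word(graph_dict, word, start_vertex)
--             for label in graph_dict[vertex]:
--                 yield word + label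
-- ===== SOURCE B (Python) =====
-- def enumerate_fixed_length_paths(graph_dict, start_vertex, length):
--     if length <= 0:
--         yield ""
--     else:
--         for label, successor in graph_dict[start_vertex].items():
--             for rest in enumerate_fixed_length_paths(graph_dict, successor, length - 1):
--                 yield label + rest
-- ===== Notes on version B (the rewrite author's own statement) =====
-- stated objective: simpler
-- what changed: B recurses forward from the current vertex, threading it through the recursion and prepending each label to the recursive suffixes, which eliminates follow_word's character-by-character re-walk of every prefix that A performs at each level.
-- outside the precondition, e.g. on enumerate_fixed_length_paths({0: {'a': 1}, 1: {'b': 2}}, 0, 2): A returns ['ab'], B returns ['ab']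
import Mathlib
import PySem

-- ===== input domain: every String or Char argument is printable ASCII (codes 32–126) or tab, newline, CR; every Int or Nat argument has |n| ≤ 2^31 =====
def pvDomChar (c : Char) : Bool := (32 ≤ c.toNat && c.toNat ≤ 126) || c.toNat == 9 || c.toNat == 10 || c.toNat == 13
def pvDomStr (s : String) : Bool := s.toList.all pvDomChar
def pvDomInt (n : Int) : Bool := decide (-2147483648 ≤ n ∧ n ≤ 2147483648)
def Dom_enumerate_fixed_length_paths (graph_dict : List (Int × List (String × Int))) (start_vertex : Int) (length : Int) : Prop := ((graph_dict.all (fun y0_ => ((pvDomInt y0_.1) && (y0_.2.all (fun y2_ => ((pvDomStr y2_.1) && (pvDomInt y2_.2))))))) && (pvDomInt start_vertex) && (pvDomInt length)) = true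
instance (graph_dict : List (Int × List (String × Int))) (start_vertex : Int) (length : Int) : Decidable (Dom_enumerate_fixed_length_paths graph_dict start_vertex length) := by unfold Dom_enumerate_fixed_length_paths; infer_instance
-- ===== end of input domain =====

-- B recurses FORWARD, threading the current vertex, instead of re-following every word from
-- the start with follow_word: simpler (no follow_word) and avoids re-walking each prefix.
-- Both Pythons are generators; equivalence is about the materialised list of yielded words.

-- ===== PORT A =====
-- dict lookup graph_dict[v]: first match; the default [] is never reached inside Pre_
def pvAdj (graph_dict : List (Int × List (String × Int))) (v : Int) : List (String × Int) :=
  ((graph_dict.find? (fun p => p.1 == v)).map Prod.snd).getD []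

-- inner lookup graph_dict[v][letter] for a 1-char string; default 0 never reached inside Pre_
def pvStep (graph_dict : List (Int × List (String × Int))) (v : Int) (c : Char) : Int :=
  (((pvAdj graph_dict v).find? (fun q => q.1 == String.ofList [c])).map Prod.snd).getD 0

def follow_word (graph_dict : List (Int × List (String × Int))) (word : String) (start_vertex : Int) : Int :=
  word.toList.foldl (pvStep graph_dict) start_vertex

def pvEnumA (graph_dict : List (Int × List (String × Int))) (start_vertex : Int) : Nat → List String
  | 0 => [""]
  | n + 1 =>
    (pvEnumA graph_dict start_vertex n).flatMap (fun word =>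
      (pvAdj graph_dict (follow_word graph_dict word start_vertex)).map (fun q => word ++ q.1))

def enumerate_fixed_length_paths (graph_dict : List (Int × List (String × Int))) (start_vertex : Int) (length : Int) : List String :=
  pvEnumA graph_dict start_vertex length.toNat   -- length.toNat = 0 iff length ≤ 0 (the base case)

-- ===== PORT B =====
def pvEnumB (graph_dict : List (Int × List (String × Int))) : Int → Nat → List String
  | _, 0 => [""]
  | v, n + 1 =>
    (pvAdj graph_dict v).flatMap (fun q =>
      (pvEnumB graph_dict q.2 n).map (fun rest => q.1 ++ rest))

def enumerate_fixed_length_paths_alt (graph_dict : List (Int × List (String × Int))) (start_vertex : Int) (length : Int) : List String :=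
  pvEnumB graph_dict start_vertex length.toNat

-- ===== PRECONDITION & SPEC =====
-- For length ≥ 2, Pre_ requires every edge label to be a single character and every successor to be a
-- listed vertex, because A's follow_word re-follows each yielded word CHARACTER by character: on
-- multi-character labels it visits spurious vertices (usually a KeyError, otherwise an accidental
-- value B should not match) and on unlisted successors it raises KeyError unless the path happens to
-- stop just before them; for length ≥ 1 the start vertex must be listed or A raises KeyError.
def Pre_enumerate_fixed_length_paths (graph_dict : List (Int × List (String × Int))) (start_vertex : Int) (length : Int) : Prop :=
  length ≤ 0 ∨
    (start_vertex ∈ graph_dict.map Prod.fst ∧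
      (length = 1 ∨
        ∀ p ∈ graph_dict, (p.2.map Prod.fst).Nodup ∧
          ∀ q ∈ p.2, q.1.toList.length = 1 ∧ q.2 ∈ graph_dict.map Prod.fst))

instance (graph_dict : List (Int × List (String × Int))) (start_vertex : Int) (length : Int) : Decidable (Pre_enumerate_fixed_length_paths graph_dict start_vertex length) := by unfold Pre_enumerate_fixed_length_paths; infer_instance

def pvWitness_enumerate_fixed_length_paths : (List (Int × List (String × Int))) × Int × Int :=
  ([(0, [("a", 0), ("b", 1)]), (1, [("a", 0)])], 0, 2)

def Spec_enumerate_fixed_length_paths (graph_dict : List (Int × List (String × Int))) (start_vertex : Int) (length : Int) (out : List String) : Prop := out = enumerate_fixed_length_paths_alt graph_dict start_vertex length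
instance (graph_dict : List (Int × List (String × Int))) (start_vertex : Int) (length : Int) (out : List String) : Decidable (Spec_enumerate_fixed_length_paths graph_dict start_vertex length out) := by unfold Spec_enumerate_fixed_length_paths; infer_instance

-- ===== CLAIM (what is proved, stated in full; the proofs are below) =====
def Claim_equal_enumerate_fixed_length_paths : Prop := ∀ (graph_dict : List (Int × List (String × Int))) (start_vertex : Int) (length : Int), Dom_enumerate_fixed_length_paths graph_dict start_vertex length → Pre_enumerate_fixed_length_paths graph_dict start_vertex length → Spec_enumerate_fixed_length_paths graph_dict start_vertex length (enumerate_fixed_length_paths graph_dict start_vertex length)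

-- ===== LEMMAS AND PROOFS =====

-- the structural condition Pre_ imposes for length ≥ 2
def pvGood (g : List (Int × List (String × Int))) : Prop :=
  ∀ p ∈ g, (p.2.map Prod.fst).Nodup ∧ ∀ q ∈ p.2, q.1.toList.length = 1 ∧ q.2 ∈ g.map Prod.fst

theorem pvAdj_mem {g : List (Int × List (String × Int))} {v : Int}
    (h : v ∈ g.map Prod.fst) : (v, pvAdj g v) ∈ g := by
  induction g with
  | nil => simp at h
  | cons p g ih =>
    by_cases hv : p.1 = v
    · simp [pvAdj, hv]
      left; exact Prod.ext hv.symm rfl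
    · have h' : v ∈ g.map Prod.fst := by
        simp at h; rcases h with h | h
        · exact absurd h.symm hv
        · simpa using h
      have : pvAdj (p :: g) v = pvAdj g v := by
        simp [pvAdj, hv]
      rw [this]
      exact List.mem_cons_of_mem _ (ih h')

theorem find?_label {adj : List (String × Int)} {l : String} {x : Int}
    (hnd : (adj.map Prod.fst).Nodup) (hmem : (l, x) ∈ adj) :
    adj.find? (fun q => q.1 == l) = some (l, x) := by
  induction adj with
  | nil => simp at hmem
  | cons q adj ih =>
    rw [List.map_cons, List.nodup_cons] at hnd
    rcases List.mem_cons.1 hmem with h | h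
    · subst h; simp
    · have hne : (q.1 == l) = false := by
        rw [beq_eq_false_iff_ne]
        intro he
        exact hnd.1 (by rw [he]; exact List.mem_map.2 ⟨(l, x), h, rfl⟩)
      rw [List.find?_cons, hne]
      exact ih hnd.2 h

theorem pvStep_eq {g : List (Int × List (String × Int))} {v : Int} {l : String} {x : Int} {c : Char}
    (hg : pvGood g) (hv : v ∈ g.map Prod.fst)
    (hmem : (l, x) ∈ pvAdj g v) (hc : l.toList = [c]) :
    pvStep g v c = x := by
  have hpair := pvAdj_mem hv
  have hnd := (hg _ hpair).1
  have hl : String.ofList [c] = l := by rw [← hc, String.ofList_toList]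
  unfold pvStep
  rw [hl, find?_label hnd hmem]
  rfl

theorem follow_append (g : List (Int × List (String × Int))) (s t : String) (v : Int) :
    follow_word g (s ++ t) v = follow_word g t (follow_word g s v) := by
  simp [follow_word, List.foldl_append]

theorem follow_label {g : List (Int × List (String × Int))} {v : Int} {l : String} {x : Int}
    (hg : pvGood g) (hv : v ∈ g.map Prod.fst) (hmem : (l, x) ∈ pvAdj g v) :
    follow_word g l v = x := by
  have hone := ((hg _ (pvAdj_mem hv)).2 _ hmem).1
  obtain ⟨c, hc⟩ : ∃ c, l.toList = [c] := List.length_eq_one_iff.mp hone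
  simp [follow_word, hc, pvStep_eq hg hv hmem hc]

theorem pv_flatten_map_single {α β : Type} (xs : List α) (f : α → β) :
    (xs.map (fun x => [f x])).flatten = xs.map f := by
  induction xs with
  | nil => rfl
  | cons x xs ih => simp [ih]

-- B also satisfies A's "extend every shorter word at its endpoint" recurrence
theorem pvEnumB_snoc {g : List (Int × List (String × Int))} (hg : pvGood g) :
    ∀ (n : Nat) (v : Int), v ∈ g.map Prod.fst →
      pvEnumB g v (n + 1) =
        (pvEnumB g v n).flatMap (fun w =>
          (pvAdj g (follow_word g w v)).map (fun q => w ++ q.1)) := by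
  intro n
  induction n with
  | zero =>
    intro v hv
    simp [pvEnumB, follow_word, List.flatMap, pv_flatten_map_single]
  | succ n ih =>
    intro v hv
    have hsucc : ∀ q ∈ pvAdj g v, q.2 ∈ g.map Prod.fst := fun q hq =>
      ((hg _ (pvAdj_mem hv)).2 q hq).2
    calc pvEnumB g v (n + 2)
        = (pvAdj g v).flatMap (fun q => (pvEnumB g q.2 (n + 1)).map (fun r => q.1 ++ r)) := rfl
      _ = (pvAdj g v).flatMap (fun q =>
            ((pvEnumB g q.2 n).flatMap (fun w =>
              (pvAdj g (follow_word g w q.2)).map (fun p => w ++ p.1))).map (fun r => q.1 ++ r)) := by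
          refine List.flatMap_congr (fun q hq => ?_)
          rw [ih q.2 (hsucc q hq)]
      _ = (pvAdj g v).flatMap (fun q =>
            (pvEnumB g q.2 n).flatMap (fun w =>
              (pvAdj g (follow_word g ((q.1 : String) ++ w) v)).map (fun p => (q.1 ++ w) ++ p.1))) := by
          refine List.flatMap_congr (fun q hq => ?_)
          rw [List.map_flatMap]
          refine List.flatMap_congr (fun w _ => ?_)
          rw [List.map_map, follow_append, follow_label hg hv hq]
          simp [Function.comp, String.append_assoc]
      _ = (pvEnumB g v (n + 1)).flatMap (fun w =>
            (pvAdj g (follow_word g w v)).map (fun q => w ++ q.1)) := by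
          show _ = ((pvAdj g v).flatMap fun q => (pvEnumB g q.2 n).map (fun r => q.1 ++ r)).flatMap _
          rw [List.flatMap_assoc]
          refine List.flatMap_congr (fun q _ => ?_)
          rw [List.flatMap_map]

theorem pvEnum_eq {g : List (Int × List (String × Int))} {s : Int}
    (hg : pvGood g) (hs : s ∈ g.map Prod.fst) :
    ∀ n, pvEnumA g s n = pvEnumB g s n := by
  intro n
  induction n with
  | zero => rfl
  | succ n ih =>
    rw [pvEnumB_snoc hg n s hs]
    simp only [pvEnumA, ih]

-- for length = 1 no word is ever re-followed, so no structural condition is needed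
theorem pvEnum_one (g : List (Int × List (String × Int))) (s : Int) :
    pvEnumA g s 1 = pvEnumB g s 1 := by
  simp [pvEnumA, pvEnumB, follow_word, List.flatMap, pv_flatten_map_single]

-- ===== VERDICT (by name: the statement is the Claim_ definition above) =====
theorem enumerate_fixed_length_paths_spec : Claim_equal_enumerate_fixed_length_paths := by
  intro g s len _ hpre
  unfold Spec_enumerate_fixed_length_paths enumerate_fixed_length_paths enumerate_fixed_length_paths_alt
  rcases hpre with hle | ⟨hs, hone | hg⟩
  · have : len.toNat = 0 := Int.toNat_of_nonpos hle
    rw [this]; rfl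
  · have : len.toNat = 1 := by omega
    rw [this]; exact pvEnum_one g s
  · exact pvEnum_eq hg hs len.toNat
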